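-- pv_equiv track=rewrite | github.com/uzhdag/pathpy | pathpy/classes/paths.py | contained_paths
-- ===== SOURCE A (Python) =====
-- def contained_paths(p, node_filter):
--     """Returns the set of maximum-length sub-paths of the path p, which only contain
--     nodes that appear in the node_filter. As an example, for the path (a,b,c,d,e,f,g)
--     and a node_filter [a,b,d,f,g], the method will return [(a,b), (d,), (f,g)].
--
--     Parameters
--     ----------
--     p: tuple
--         a path tuple to check for contained paths
--     node_filter: set
--         a set of nodes to which the contained paths should be limited
--
--     Returns
--     -------
--     """
--
--     contained_paths = []
--     current_path = ()
--     for node in p: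
--         if node in node_filter:
--             current_path += (node,)
--         else:
--             if current_path:
--                 contained_paths.append(current_path)
--                 current_path = ()
--     if current_path:
--         contained_paths.append(current_path)
--
--     return contained_paths
-- ===== SOURCE B (Python) =====
-- def contained_paths(p, node_filter):
--     n = len(p)
--     starts = [i for i in range(n)
--               if p[i] in node_filter and (i == 0 or p[i - 1] not in node_filter)]
--     ends = [i for i in range(n)
--             if p[i] in node_filter and (i == n - 1 or p[i + 1] not in node_filter)]
--     return [tuple(p[s:e + 1]) for s, e in zip(starts, ends)]
-- ===== Notes on version B (the rewrite author's own statement) =====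
-- stated objective: alternative
-- what changed: Replaces A's single-pass run accumulator with boundary computation: two index comprehensions find run-start and run-end positions, which are zipped and used to slice p once per run; no running tuple is maintained.
import Mathlib
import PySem

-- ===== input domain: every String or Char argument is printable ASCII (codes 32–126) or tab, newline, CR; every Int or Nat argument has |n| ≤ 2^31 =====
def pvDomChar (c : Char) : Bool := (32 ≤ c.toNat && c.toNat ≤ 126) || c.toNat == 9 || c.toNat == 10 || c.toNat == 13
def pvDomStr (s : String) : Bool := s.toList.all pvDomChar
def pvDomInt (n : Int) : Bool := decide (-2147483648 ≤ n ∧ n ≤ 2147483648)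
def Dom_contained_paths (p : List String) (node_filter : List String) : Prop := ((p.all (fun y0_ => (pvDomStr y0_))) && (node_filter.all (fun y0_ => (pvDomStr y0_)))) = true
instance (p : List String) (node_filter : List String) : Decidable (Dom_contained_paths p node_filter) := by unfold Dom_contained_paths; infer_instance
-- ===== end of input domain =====

-- B replaces A's running accumulator by a boundary computation: it finds the
-- run-start and run-end index lists, zips them and slices p (alternative).

-- ===== PORT A =====
-- loop state: (contained_paths, current_path)
def contained_paths (p : List String) (node_filter : List String) : List (List String) :=
  let st := p.foldl
    (fun (st : List (List String) × List String) node =>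
      if node ∈ node_filter then (st.1, st.2 ++ [node])
      else if st.2.isEmpty then st else (st.1 ++ [st.2], []))
    ([], [])
  if st.2.isEmpty then st.1 else st.1 ++ [st.2]

-- ===== PORT B =====
-- p[i] in node_filter (pyGet?: none = IndexError, only reachable behind a
-- short-circuited 'or' in Source B, where the value is discarded)
def cpMem (p : List String) (nf : List String) (i : Int) : Bool :=
  match PySem.List.pyGet? p i with
  | some x => decide (x ∈ nf)
  | none => false

def contained_paths_alt (p : List String) (node_filter : List String) : List (List String) :=
  let n : Int := p.length
  let starts := (PySem.List.pyRange 0 n 1).filter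
    (fun i => cpMem p node_filter i && (i == 0 || !cpMem p node_filter (i - 1)))
  let ends := (PySem.List.pyRange 0 n 1).filter
    (fun i => cpMem p node_filter i && (i == n - 1 || !cpMem p node_filter (i + 1)))
  (starts.zip ends).map (fun se => PySem.List.slice p (some se.1) (some (se.2 + 1)))

-- ===== PRECONDITION & SPEC =====
def Spec_contained_paths (p : List String) (node_filter : List String) (out : List (List String)) : Prop := out = contained_paths_alt p node_filter
instance (p : List String) (node_filter : List String) (out : List (List String)) : Decidable (Spec_contained_paths p node_filter out) := by unfold Spec_contained_paths; infer_instance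

-- ===== CLAIM (what is proved, stated in full; the proofs are below) =====
def Claim_equal_contained_paths : Prop := ∀ (p : List String) (node_filter : List String), Dom_contained_paths p node_filter → Spec_contained_paths p node_filter (contained_paths p node_filter)

-- ===== LEMMAS AND PROOFS =====

-- direct recursive characterisation of A's loop-with-final-flush
def cpRest (nf : List String) : List String → List String → List (List String)
  | cur, [] => if cur.isEmpty then [] else [cur]
  | cur, x :: xs =>
    if x ∈ nf then cpRest nf (cur ++ [x]) xs
    else (if cur.isEmpty then [] else [cur]) ++ cpRest nf [] xs

lemma contained_paths_loop (nf : List String) (p : List String) :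
    ∀ (acc : List (List String)) (cur : List String),
      (let st := p.foldl
        (fun (st : List (List String) × List String) node =>
          if node ∈ nf then (st.1, st.2 ++ [node])
          else if st.2.isEmpty then st else (st.1 ++ [st.2], []))
        (acc, cur)
       if st.2.isEmpty then st.1 else st.1 ++ [st.2]) = acc ++ cpRest nf cur p := by
  induction p with
  | nil => intro acc cur; simp [cpRest]; split_ifs <;> simp
  | cons x xs ih =>
    intro acc cur
    simp only [List.foldl_cons, cpRest]
    by_cases hx : x ∈ nf
    · simp only [hx, if_true]
      exact ih acc (cur ++ [x])
    · simp only [hx, if_false]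
      by_cases hc : cur.isEmpty
      · have hcur : cur = [] := List.isEmpty_iff.mp hc
        subst hcur
        simpa using ih acc []
      · rw [if_neg hc, if_neg hc, ih (acc ++ [cur]) []]
        simp

lemma contained_paths_eq_rest (p nf : List String) :
    contained_paths p nf = cpRest nf [] p := by
  unfold contained_paths
  simpa using contained_paths_loop nf p [] []

lemma cpRest_members (nf : List String) :
    ∀ (run rest cur : List String), (∀ y ∈ run, y ∈ nf) →
      cpRest nf cur (run ++ rest) = cpRest nf (cur ++ run) rest := by
  intro run
  induction run with
  | nil => intro rest cur _; simp
  | cons y ys ih =>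
    intro rest cur h
    have hy : y ∈ nf := h y (by simp)
    simp only [List.cons_append, cpRest, hy, if_true]
    rw [ih rest (cur ++ [y]) (fun z hz => h z (by simp [hz]))]
    simp

lemma cpRest_flush (nf : List String) (cur rest : List String)
    (hcur : cur.isEmpty = false)
    (hrest : rest = [] ∨ ∃ h t, rest = h :: t ∧ h ∉ nf) :
    cpRest nf cur rest = cur :: cpRest nf [] rest := by
  rcases hrest with h | ⟨h, t, rfl, hh⟩
  · subst h; simp [cpRest, hcur]
  · simp [cpRest, hh, hcur]

lemma cpRest_nonmembers (nf : List String) :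
    ∀ (run rest : List String), (∀ y ∈ run, y ∉ nf) →
      cpRest nf [] (run ++ rest) = cpRest nf [] rest := by
  intro run
  induction run with
  | nil => intro rest _; simp
  | cons y ys ih =>
    intro rest h
    have hy : y ∉ nf := h y (by simp)
    simp only [List.cons_append, cpRest, hy, if_false, List.isEmpty_nil, if_true,
      List.nil_append]
    exact ih rest (fun z hz => h z (by simp [hz]))

-- Nat-indexed mirror of B
def memN (p nf : List String) (i : Nat) : Bool :=
  match p[i]? with
  | some x => decide (x ∈ nf)
  | none => false

def startsN (p nf : List String) : List Nat :=
  (List.range p.length).filter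
    (fun i => memN p nf i && (decide (i = 0) || !memN p nf (i - 1)))

def endsN (p nf : List String) : List Nat :=
  (List.range p.length).filter
    (fun i => memN p nf i && (decide (i = p.length - 1) || !memN p nf (i + 1)))

def altN (p nf : List String) : List (List String) :=
  ((startsN p nf).zip (endsN p nf)).map
    (fun se => (p.drop se.1).take (se.2 + 1 - se.1))


lemma cpMem_natCast (p nf : List String) (k : Nat) :
    cpMem p nf (k : Int) = memN p nf k := by
  unfold cpMem memN
  rw [PySem.List.pyGet?_natCast]

lemma alt_eq_altN (p nf : List String) :
    contained_paths_alt p nf = altN p nf := by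
  unfold contained_paths_alt altN
  have hr : PySem.List.pyRange 0 (p.length : Int) 1
      = (List.range p.length).map (fun k : Nat => (k : Int)) := by
    rw [PySem.List.pyRange_one]
    simp
  simp only [hr, List.filter_map]
  have hs : ∀ k ∈ List.range p.length,
      ((fun i => cpMem p nf i && (i == 0 || !cpMem p nf (i - 1))) ∘ (fun k : Nat => (k : Int))) k
        = (fun i => memN p nf i && (decide (i = 0) || !memN p nf (i - 1))) k := by
    intro k _
    simp only [Function.comp, cpMem_natCast]
    rcases Nat.eq_zero_or_pos k with h0 | h0
    · subst h0; simp
    · have h1 : ((k : Int) - 1) = ((k - 1 : Nat) : Int) := by omega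
      have h2 : ((k : Int) == 0) = false := by simp; omega
      have h3 : decide (k = 0) = false := by simp; omega
      rw [h1, cpMem_natCast, h2, h3]
  have he : ∀ k ∈ List.range p.length,
      ((fun i => cpMem p nf i && (i == (p.length : Int) - 1 || !cpMem p nf (i + 1))) ∘ (fun k : Nat => (k : Int))) k
        = (fun i => memN p nf i && (decide (i = p.length - 1) || !memN p nf (i + 1))) k := by
    intro k hk
    have hk' : k < p.length := List.mem_range.mp hk
    simp only [Function.comp, cpMem_natCast]
    have h1 : ((k : Int) + 1) = ((k + 1 : Nat) : Int) := by omega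
    have h2 : ((k : Int) == (p.length : Int) - 1) = decide (k = p.length - 1) := by
      by_cases hc : k = p.length - 1
      · simp only [hc, decide_true, beq_iff_eq]
        omega
      · simp only [hc, decide_false, beq_eq_false_iff_ne, ne_eq]
        omega
    rw [h1, cpMem_natCast, h2]
  rw [List.filter_congr hs, List.filter_congr he, List.zip_map, List.map_map]
  apply List.map_congr_left
  intro se _
  simp only [Function.comp_apply, Prod.map]
  have hb : ((se.2 : Int) + 1) = ((se.2 + 1 : Nat) : Int) := by omega
  rw [hb, PySem.List.slice_natCast]

lemma memN_append_right (t r nf : List String) (j : Nat) :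
    memN (t ++ r) nf (t.length + j) = memN r nf j := by
  unfold memN
  rw [List.getElem?_append_right (by omega)]
  simp

lemma memN_append_left (t r nf : List String) (i : Nat) (h : i < t.length) :
    memN (t ++ r) nf i = memN t nf i := by
  unfold memN
  rw [List.getElem?_append_left h]

lemma memN_of_all_not (t nf : List String) (i : Nat) (h : ∀ y ∈ t, y ∉ nf) :
    memN t nf i = false := by
  unfold memN
  cases hg : t[i]? with
  | none => rfl
  | some x => simpa using h x (List.mem_of_getElem? hg)

lemma memN_of_all_mem (t nf : List String) (i : Nat) (hi : i < t.length)
    (h : ∀ y ∈ t, y ∈ nf) : memN t nf i = true := by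
  unfold memN
  rw [List.getElem?_eq_getElem hi]
  simpa using h _ (List.getElem_mem hi)

lemma filter_range_eq_zero (p : Nat → Bool) (n : Nat) (hn : 1 ≤ n)
    (h0 : p 0 = true) (h : ∀ i, 1 ≤ i → i < n → p i = false) :
    (List.range n).filter p = [0] := by
  induction n with
  | zero => omega
  | succ m ih =>
    rw [List.range_succ, List.filter_append]
    rcases Nat.eq_zero_or_pos m with hm | hm
    · subst hm; simp [h0]
    · rw [ih hm (fun i hi hin => h i hi (by omega))]
      simp [h m hm (by omega)]

lemma filter_range_eq_last (p : Nat → Bool) (n : Nat) (hn : 1 ≤ n)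
    (hl : p (n - 1) = true) (h : ∀ i, i < n - 1 → p i = false) :
    (List.range n).filter p = [n - 1] := by
  obtain ⟨m, rfl⟩ : ∃ m, n = m + 1 := ⟨n - 1, by omega⟩
  rw [List.range_succ, List.filter_append]
  have h1 : (List.range m).filter p = [] := by
    rw [List.filter_eq_nil_iff]
    intro i hi
    simp [h i (by have := List.mem_range.mp hi; omega)]
  have hm : m + 1 - 1 = m := by omega
  rw [hm] at hl h ⊢
  simp [h1, hl]

lemma startsN_append_not (t r nf : List String) (ht : ∀ y ∈ t, y ∉ nf) :
    startsN (t ++ r) nf = (startsN r nf).map (fun j => t.length + j) := by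
  by_cases hte : t = []
  · subst hte; simp [startsN]
  · have htl : 1 ≤ t.length := by
      cases t
      · exact absurd rfl hte
      · simp
    unfold startsN
    rw [List.length_append, List.range_add, List.filter_append, List.filter_map]
    have h1 : (List.range t.length).filter
        (fun i => memN (t ++ r) nf i && (decide (i = 0) || !memN (t ++ r) nf (i - 1))) = [] := by
      rw [List.filter_eq_nil_iff]
      intro i hi
      have hi' : i < t.length := List.mem_range.mp hi
      rw [memN_append_left t r nf i hi', memN_of_all_not t nf i ht]
      simp
    rw [h1, List.nil_append]
    congr 1
    apply List.filter_congr
    intro j hj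
    simp only [Function.comp]
    have h0 : decide (t.length + j = 0) = false := by simp only [decide_eq_false_iff_not]; omega
    rcases Nat.eq_zero_or_pos j with hj0 | hj0
    · subst hj0
      have hlt : t.length + 0 - 1 < t.length := by omega
      have hx : memN (t ++ r) nf (t.length + 0 - 1) = false := by
        rw [memN_append_left t r nf _ hlt, memN_of_all_not t nf _ ht]
      rw [memN_append_right t r nf 0, h0, hx]
      simp
    · have h2 : t.length + j - 1 = t.length + (j - 1) := by omega
      have h3 : decide (j = 0) = false := by simp only [decide_eq_false_iff_not]; omega
      rw [memN_append_right t r nf j, h0, h2, memN_append_right t r nf (j - 1), h3]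

lemma endsN_pred_shift (t r nf : List String) (j : Nat) (hj : j < r.length) :
    (memN (t ++ r) nf (t.length + j) &&
      (decide (t.length + j = (t ++ r).length - 1) || !memN (t ++ r) nf (t.length + j + 1)))
    = (memN r nf j && (decide (j = r.length - 1) || !memN r nf (j + 1))) := by
  have h2 : t.length + j + 1 = t.length + (j + 1) := by omega
  have h4 : decide (t.length + j = (t ++ r).length - 1) = decide (j = r.length - 1) := by
    simp only [List.length_append, decide_eq_decide]
    omega
  rw [memN_append_right t r nf j, h2, memN_append_right t r nf (j + 1), h4]

lemma endsN_append_not (t r nf : List String) (ht : ∀ y ∈ t, y ∉ nf) :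
    endsN (t ++ r) nf = (endsN r nf).map (fun j => t.length + j) := by
  by_cases hte : t = []
  · subst hte
    simp only [List.nil_append, List.length_nil]
    apply Eq.symm
    apply List.map_congr_left ?_ |>.trans (List.map_id _)
    intro j _
    simp
  · unfold endsN
    rw [List.length_append, List.range_add, List.filter_append, List.filter_map]
    have h1 : (List.range t.length).filter
        (fun i => memN (t ++ r) nf i &&
          (decide (i = t.length + r.length - 1) || !memN (t ++ r) nf (i + 1))) = [] := by
      rw [List.filter_eq_nil_iff]
      intro i hi
      have hi' : i < t.length := List.mem_range.mp hi
      rw [memN_append_left t r nf i hi', memN_of_all_not t nf i ht]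
      simp
    rw [h1, List.nil_append]
    congr 1
    apply List.filter_congr
    intro j hj
    have hj' : j < r.length := List.mem_range.mp hj
    simp only [Function.comp]
    have := endsN_pred_shift t r nf j hj'
    simp only [List.length_append] at this
    exact this

lemma altN_append_not (t r nf : List String) (ht : ∀ y ∈ t, y ∉ nf) :
    altN (t ++ r) nf = altN r nf := by
  unfold altN
  rw [startsN_append_not t r nf ht, endsN_append_not t r nf ht, List.zip_map, List.map_map]
  apply List.map_congr_left
  intro se _
  simp only [Function.comp_apply, Prod.map]
  have h1 : t.length + se.2 + 1 - (t.length + se.1) = se.2 + 1 - se.1 := by omega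
  have h2 : List.drop (t.length + se.1) t = [] := List.drop_eq_nil_of_le (by omega)
  have h3 : t.length + se.1 - t.length = se.1 := by omega
  rw [h1, List.drop_append, h2, h3, List.nil_append]

lemma startsN_append_mem (t r nf : List String) (hne : t ≠ [])
    (ht : ∀ y ∈ t, y ∈ nf) (hr0 : memN r nf 0 = false) :
    startsN (t ++ r) nf = 0 :: (startsN r nf).map (fun j => t.length + j) := by
  have htl : 1 ≤ t.length := by
    cases t
    · exact absurd rfl hne
    · simp
  unfold startsN
  rw [List.length_append, List.range_add, List.filter_append, List.filter_map]
  have h1 : (List.range t.length).filter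
      (fun i => memN (t ++ r) nf i && (decide (i = 0) || !memN (t ++ r) nf (i - 1))) = [0] := by
    apply filter_range_eq_zero _ _ htl
    · rw [memN_append_left t r nf 0 (by omega), memN_of_all_mem t nf 0 (by omega) ht]
      simp
    · intro i hi hin
      rw [memN_append_left t r nf i hin,
        memN_append_left t r nf (i - 1) (by omega),
        memN_of_all_mem t nf i hin ht, memN_of_all_mem t nf (i - 1) (by omega) ht]
      simp
      omega
  rw [h1]
  simp only [List.cons_append, List.nil_append]
  congr 1
  congr 1
  apply List.filter_congr
  intro j hj
  simp only [Function.comp]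
  have h0 : decide (t.length + j = 0) = false := by simp only [decide_eq_false_iff_not]; omega
  rcases Nat.eq_zero_or_pos j with hj0 | hj0
  · subst hj0
    have hlt : t.length + 0 - 1 < t.length := by omega
    have hx : memN (t ++ r) nf (t.length + 0 - 1) = true := by
      rw [memN_append_left t r nf _ hlt, memN_of_all_mem t nf _ hlt ht]
    rw [memN_append_right t r nf 0, h0, hx, hr0]
    simp
  · have h2 : t.length + j - 1 = t.length + (j - 1) := by omega
    have h3 : decide (j = 0) = false := by simp only [decide_eq_false_iff_not]; omega
    rw [memN_append_right t r nf j, h0, h2, memN_append_right t r nf (j - 1), h3]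

lemma endsN_append_mem (t r nf : List String) (hne : t ≠ [])
    (ht : ∀ y ∈ t, y ∈ nf) (hr0 : memN r nf 0 = false) :
    endsN (t ++ r) nf = (t.length - 1) :: (endsN r nf).map (fun j => t.length + j) := by
  have htl : 1 ≤ t.length := by
    cases t
    · exact absurd rfl hne
    · simp
  unfold endsN
  rw [List.length_append, List.range_add, List.filter_append, List.filter_map]
  have h1 : (List.range t.length).filter
      (fun i => memN (t ++ r) nf i &&
        (decide (i = t.length + r.length - 1) || !memN (t ++ r) nf (i + 1))) = [t.length - 1] := by
    apply filter_range_eq_last _ _ htl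
    · have hx : memN (t ++ r) nf (t.length - 1 + 1) = false := by
        have he : t.length - 1 + 1 = t.length + 0 := by omega
        rw [he, memN_append_right t r nf 0, hr0]
      rw [memN_append_left t r nf (t.length - 1) (by omega),
        memN_of_all_mem t nf (t.length - 1) (by omega) ht, hx]
      simp
    · intro i hi
      rw [memN_append_left t r nf i (by omega),
        memN_append_left t r nf (i + 1) (by omega),
        memN_of_all_mem t nf i (by omega) ht,
        memN_of_all_mem t nf (i + 1) (by omega) ht]
      simp
      omega
  rw [h1]
  simp only [List.cons_append, List.nil_append]
  congr 1
  congr 1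
  apply List.filter_congr
  intro j hj
  have hj' : j < r.length := List.mem_range.mp hj
  simp only [Function.comp]
  have := endsN_pred_shift t r nf j hj'
  simp only [List.length_append] at this
  exact this

lemma altN_append_mem (t r nf : List String) (hne : t ≠ [])
    (ht : ∀ y ∈ t, y ∈ nf) (hr0 : memN r nf 0 = false) :
    altN (t ++ r) nf = t :: altN r nf := by
  have htl : 1 ≤ t.length := by
    cases t
    · exact absurd rfl hne
    · simp
  unfold altN
  rw [startsN_append_mem t r nf hne ht hr0, endsN_append_mem t r nf hne ht hr0,
    List.zip_cons_cons, List.zip_map, List.map_cons, List.map_map]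
  congr 1
  · have h1 : t.length - 1 + 1 - 0 = t.length := by omega
    rw [List.drop_zero, h1]
    exact List.take_left
  · apply List.map_congr_left
    intro se _
    simp only [Function.comp_apply, Prod.map]
    have h1 : t.length + se.2 + 1 - (t.length + se.1) = se.2 + 1 - se.1 := by omega
    have h2 : List.drop (t.length + se.1) t = [] := List.drop_eq_nil_of_le (by omega)
    have h3 : t.length + se.1 - t.length = se.1 := by omega
    rw [h1, List.drop_append, h2, h3, List.nil_append]

lemma rest_eq_altN (nf : List String) :
    ∀ (n : Nat) (p : List String), p.length ≤ n →
      cpRest nf [] p = altN p nf := by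
  intro n
  induction n with
  | zero =>
    intro p hp
    have : p = [] := List.length_eq_zero_iff.mp (Nat.le_zero.mp hp)
    subst this
    simp [cpRest, altN, startsN, endsN]
  | succ n ih =>
    intro p hp
    match p with
    | [] => simp [cpRest, altN, startsN, endsN]
    | x :: xs =>
      by_cases hx : x ∈ nf
      · set pr := fun y : String => decide (y ∈ nf) with hpr
        have hprx : pr x = true := by simp [hpr, hx]
        set t := (x :: xs).takeWhile pr with htdef
        set r := (x :: xs).dropWhile pr with hrdef
        have hsplit : t ++ r = x :: xs := List.takeWhile_append_dropWhile
        have htmem : ∀ y ∈ t, y ∈ nf := by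
          intro y hy
          have := List.mem_takeWhile_imp hy
          simpa [hpr] using this
        have htne : t ≠ [] := by
          rw [htdef, List.takeWhile_cons_of_pos hprx]
          simp
        have hrshape : r = [] ∨ ∃ h tl, r = h :: tl ∧ h ∉ nf := by
          have hthis := List.head?_dropWhile_not pr (x :: xs)
          rw [← hrdef] at hthis
          cases hr : r with
          | nil => exact Or.inl rfl
          | cons h tl =>
            rw [hr] at hthis
            simp only [List.head?_cons, hpr, decide_eq_false_iff_not] at hthis
            exact Or.inr ⟨h, tl, rfl, hthis⟩
        have hr0 : memN r nf 0 = false := by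
          rcases hrshape with hr | ⟨h, tl, hr, hh⟩
          · rw [hr]; simp [memN]
          · rw [hr]; simp [memN, hh]
        have hrlen : r.length ≤ n := by
          rw [hrdef, List.dropWhile_cons_of_pos hprx]
          have := (List.dropWhile_sublist (l := xs) (p := pr)).length_le
          have hx' : xs.length ≤ n := by simpa using hp
          omega
        rw [← hsplit]
        have hm := cpRest_members nf t r [] htmem
        simp only [List.nil_append] at hm
        rw [hm, cpRest_flush nf t r (by simp [htne]) hrshape, ih r hrlen,
          altN_append_mem t r nf htne htmem hr0]
      · set pr := fun y : String => !decide (y ∈ nf) with hpr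
        have hprx : pr x = true := by simp [hpr, hx]
        set t := (x :: xs).takeWhile pr with htdef
        set r := (x :: xs).dropWhile pr with hrdef
        have hsplit : t ++ r = x :: xs := List.takeWhile_append_dropWhile
        have htmem : ∀ y ∈ t, y ∉ nf := by
          intro y hy
          have := List.mem_takeWhile_imp hy
          simpa [hpr] using this
        have hrlen : r.length ≤ n := by
          rw [hrdef, List.dropWhile_cons_of_pos hprx]
          have := (List.dropWhile_sublist (l := xs) (p := pr)).length_le
          have hx' : xs.length ≤ n := by simpa using hp
          omega
        rw [← hsplit, cpRest_nonmembers nf t r htmem, ih r hrlen,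
          altN_append_not t r nf htmem]

-- ===== VERDICT (by name: the statement is the Claim_ definition above) =====
theorem contained_paths_spec : Claim_equal_contained_paths := by
  intro p nf _
  unfold Spec_contained_paths
  rw [contained_paths_eq_rest, alt_eq_altN]
  exact rest_eq_altN nf p.length p (le_refl _)
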